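-- pv_equiv track=rewrite | github.com/GMor10sen/UNR_CS457 | Gmortensen_pa2/PA2.py | lower_and_consider_quotes
-- ===== SOURCE A (Python) =====
-- class WrongSingleQuotes (Exception): #this makes a new exception avaliable
--     pass
--
-- def lower_and_consider_quotes (sentence):
--      quote_count = 0 # set the quote count to 0
--      new_sentence = '' # make empty string
--
--      for word in sentence: #run loop through all characters
--         if(word == "'"): #if quote detected increase the count
--            quote_count = quote_count + 1
--         if(quote_count % 2 == 0): #anything outside the quotes are lowercased
--             new_sentence = new_sentence + word.lower()
--         else: #everything inside quotes are added without modification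
--             new_sentence = new_sentence + word
--
--         new_sentence = new_sentence.replace("'", '')  #remove all the single quotes
--      if (quote_count % 2 != 0):
--         raise WrongSingleQuotes
--      return new_sentence #return the new string
-- ===== SOURCE B (Python) =====
-- class WrongSingleQuotes(Exception):
--     pass
--
--
-- def lower_and_consider_quotes(sentence):
--     pieces = sentence.split("'")
--     if len(pieces) % 2 == 0:  # even piece count = odd number of quotes
--         raise WrongSingleQuotes
--     return ''.join(p.lower() if i % 2 == 0 else p
--                    for i, p in enumerate(pieces))
-- ===== Notes on version B (the rewrite author's own statement) =====
-- stated objective: simpler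
-- what changed: B splits the sentence on the quote character once and lowercases the even-indexed (outside-quotes) pieces, replacing A's character-by-character quote-parity loop that re-runs .replace("'",'') on the whole accumulated string at every step.
import Mathlib
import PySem

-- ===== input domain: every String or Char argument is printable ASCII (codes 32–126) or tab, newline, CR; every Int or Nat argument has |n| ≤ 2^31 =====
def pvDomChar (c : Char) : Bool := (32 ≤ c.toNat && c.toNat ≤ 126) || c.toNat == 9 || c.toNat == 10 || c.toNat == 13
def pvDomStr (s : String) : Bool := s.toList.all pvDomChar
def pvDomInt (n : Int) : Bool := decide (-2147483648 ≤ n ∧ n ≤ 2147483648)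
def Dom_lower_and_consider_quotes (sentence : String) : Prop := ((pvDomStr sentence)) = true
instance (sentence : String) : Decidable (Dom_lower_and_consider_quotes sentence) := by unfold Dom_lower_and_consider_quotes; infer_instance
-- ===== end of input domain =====

-- B splits the sentence on the quote character once and lowercases the even-indexed pieces instead of
-- A's per-character parity loop that re-filters the whole accumulator each step (simpler; the timing
-- run measured it faster).

-- ===== PORT A =====
-- character loop with a quote counter; lowercases when the counter is even, re-runs
-- .replace("'", '') on the accumulated string each iteration (literal transliteration)
def lower_and_consider_quotes (sentence : String) : String :=
  let r := sentence.toList.foldl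
    (fun (st : Int × List Char) c =>
      let q := if c = '\'' then st.1 + 1 else st.1
      let ns := if PySem.Int.mod q 2 = 0 then st.2 ++ [PySem.Chars.lowerChar c] else st.2 ++ [c]
      (q, PySem.Chars.replace ns ['\''] []))
    ((0 : Int), ([] : List Char))
  String.ofList r.2

-- ===== PORT B =====
-- split on "'", lowercase even-indexed pieces, join (literal transliteration of Source B)
def lower_and_consider_quotes_alt (sentence : String) : String :=
  let pieces := PySem.Chars.splitOn sentence.toList ['\'']
  String.ofList (PySem.Chars.join []
    ((PySem.List.enumerate pieces).map
      (fun p => if PySem.Int.mod p.1 2 = 0 then PySem.Chars.lower p.2 else p.2)))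

-- ===== PRECONDITION & SPEC =====
-- Pre_ excludes exactly the inputs with an odd number of single quotes, on which A
-- (and B alike) raises WrongSingleQuotes and returns nothing.
def Pre_lower_and_consider_quotes (sentence : String) : Prop :=
  (sentence.toList.count '\'') % 2 = 0
instance (sentence : String) : Decidable (Pre_lower_and_consider_quotes sentence) := by
  unfold Pre_lower_and_consider_quotes; infer_instance

def pvWitness_lower_and_consider_quotes : String := "He said 'Hi THERE' to Me"

def Spec_lower_and_consider_quotes (sentence : String) (out : String) : Prop := out = lower_and_consider_quotes_alt sentence
instance (sentence : String) (out : String) : Decidable (Spec_lower_and_consider_quotes sentence out) := by unfold Spec_lower_and_consider_quotes; infer_instance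

-- ===== CLAIM (what is proved, stated in full; the proofs are below) =====
def Claim_equal_lower_and_consider_quotes : Prop := ∀ (sentence : String), Dom_lower_and_consider_quotes sentence → Pre_lower_and_consider_quotes sentence → Spec_lower_and_consider_quotes sentence (lower_and_consider_quotes sentence)

-- ===== LEMMAS AND PROOFS =====

-- structural specification of splitting on the quote character
def pvPieces : List Char → List (List Char)
  | [] => [[]]
  | c :: cs => if c = '\'' then [] :: pvPieces cs
               else (c :: (pvPieces cs).headI) :: (pvPieces cs).tail

-- reference function: lowercase outside quotes (b = currently outside), drop quotes
def pvH : Bool → List Char → List Char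
  | _, [] => []
  | b, c :: cs => if c = '\'' then pvH (!b) cs
                  else (if b then [PySem.Chars.lowerChar c] else [c]) ++ pvH b cs

-- alternate-lowercasing of a piece list, parity carried as a Bool
def pvE : Bool → List (List Char) → List Char
  | _, [] => []
  | b, p :: ps => (if b then PySem.Chars.lower p else p) ++ pvE (!b) ps

-- A's loop body, named so the fold lemmas can speak about it (defeq to the port's lambda)
def pvStep (st : Int × List Char) (c : Char) : Int × List Char :=
  let q := if c = '\'' then st.1 + 1 else st.1
  let ns := if PySem.Int.mod q 2 = 0 then st.2 ++ [PySem.Chars.lowerChar c] else st.2 ++ [c]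
  (q, PySem.Chars.replace ns ['\''] [])

theorem pvPieces_ne_nil (cs : List Char) : pvPieces cs ≠ [] := by
  cases cs with
  | nil => simp [pvPieces]
  | cons c cs => simp only [pvPieces]; split <;> simp

theorem pvPieces_cons_headI_tail (cs : List Char) :
    pvPieces cs = (pvPieces cs).headI :: (pvPieces cs).tail := by
  cases h : pvPieces cs with
  | nil => exact absurd h (pvPieces_ne_nil cs)
  | cons p ps => simp

theorem pv_splitOn_go (fuel : Nat) (l cur : List Char) (acc : List (List Char)) (hf : l.length ≤ fuel) :
    PySem.Chars.splitOn.go ['\''] fuel l cur acc =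
      acc.reverse ++ ((cur.reverse ++ (pvPieces l).headI) :: (pvPieces l).tail) := by
  induction fuel generalizing l cur acc with
  | zero =>
    have hl : l = [] := by simpa using hf
    subst hl
    simp [PySem.Chars.splitOn.go, pvPieces]
  | succ fuel ih =>
    cases l with
    | nil => simp [PySem.Chars.splitOn.go, pvPieces]
    | cons c rest =>
      rw [PySem.Chars.splitOn.go]
      by_cases hc : c = '\''
      · subst hc
        simp only [List.isPrefixOf, BEq.rfl, Bool.true_and, if_pos]
        simp only [List.length_cons, List.length_nil, List.drop_succ_cons, List.drop_zero]
        rw [ih rest [] (cur.reverse :: acc) (by simpa using Nat.le_of_succ_le_succ hf)]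
        simp only [pvPieces, if_pos rfl]
        rw [pvPieces_cons_headI_tail rest]
        simp
      · have hpre : (['\''].isPrefixOf (c :: rest)) = false := by
          simp [List.isPrefixOf]; intro h; exact absurd h.symm hc
        rw [if_neg (by simp [hpre])]
        rw [ih rest (c :: cur) acc (by simpa using Nat.le_of_succ_le_succ hf)]
        simp only [pvPieces, if_neg hc]
        simp

theorem pv_splitOn_eq (l : List Char) :
    PySem.Chars.splitOn l ['\''] = pvPieces l := by
  unfold PySem.Chars.splitOn
  rw [pv_splitOn_go _ _ _ _ (by omega)]
  simpa using (pvPieces_cons_headI_tail l).symm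

theorem pv_replace_go (fuel : Nat) (l acc : List Char) (hf : l.length ≤ fuel) :
    PySem.Chars.replace.go ['\''] [] fuel l acc =
      acc.reverse ++ l.filter (fun c => ¬(c = '\'')) := by
  induction fuel generalizing l acc with
  | zero =>
    have hl : l = [] := by simpa using hf
    subst hl
    simp [PySem.Chars.replace.go]
  | succ fuel ih =>
    cases l with
    | nil => simp [PySem.Chars.replace.go]
    | cons c rest =>
      rw [PySem.Chars.replace.go]
      by_cases hc : c = '\''
      · subst hc
        simp only [List.isPrefixOf, BEq.rfl, Bool.true_and, if_pos]
        simp only [List.length_cons, List.length_nil, List.drop_succ_cons, List.drop_zero,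
          List.reverse_nil, List.nil_append]
        rw [ih rest acc (by simpa using Nat.le_of_succ_le_succ hf)]
        simp
      · have hpre : (['\''].isPrefixOf (c :: rest)) = false := by
          simp [List.isPrefixOf]; intro h; exact absurd h.symm hc
        rw [if_neg (by simp [hpre])]
        rw [ih rest (c :: acc) (by simpa using Nat.le_of_succ_le_succ hf)]
        simp [hc]

theorem pv_replace_quote (l : List Char) :
    PySem.Chars.replace l ['\''] [] = l.filter (fun c => ¬(c = '\'')) := by
  unfold PySem.Chars.replace
  rw [if_neg (by simp), pv_replace_go _ _ _ (Nat.le_refl _)]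
  simp

theorem pv_lowerChar_quote : PySem.Chars.lowerChar '\'' = '\'' := by decide

theorem pv_lowerChar_ne_quote (c : Char) (h : c ≠ '\'') :
    PySem.Chars.lowerChar c ≠ '\'' := by
  unfold PySem.Chars.lowerChar
  split
  · rename_i hu
    simp only [PySem.Chars.isupper, Bool.and_eq_true, decide_eq_true_eq, Char.le_def,
      UInt32.le_iff_toNat_le] at hu
    have hA : 65 ≤ c.toNat := hu.1
    have hZ : c.toNat ≤ 90 := hu.2
    intro heq
    have ht := congrArg Char.toNat heq
    rw [Char.toNat_ofNat, if_pos (by constructor; change c.toNat + 32 < 0xd800; omega)] at ht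
    have h39 : Char.toNat '\'' = 39 := by decide
    omega
  · exact h

theorem pv_join_nil : ∀ (l : List (List Char)), PySem.Chars.join [] l = l.flatten
  | [] => by simp [PySem.Chars.join, List.intercalate]
  | [p] => by simp [PySem.Chars.join, List.intercalate]
  | p :: q :: t => by
    have ih := pv_join_nil (q :: t)
    simp only [PySem.Chars.join, List.intercalate, List.intersperse] at ih ⊢
    simp only [List.flatten_cons] at ih ⊢
    rw [ih]
    simp

theorem pv_mod_two_flip (q : Int) :
    (PySem.Int.mod (q + 1) 2 = 0) ↔ ¬(PySem.Int.mod q 2 = 0) := by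
  rw [PySem.Int.mod_eq_emod_of_pos (by norm_num), PySem.Int.mod_eq_emod_of_pos (by norm_num)]
  omega

theorem pv_decide_flip (q : Int) :
    decide (PySem.Int.mod (q + 1) 2 = 0) = !decide (PySem.Int.mod q 2 = 0) := by
  by_cases h : PySem.Int.mod q 2 = 0
  · simp only [h, decide_true, Bool.not_true, decide_eq_false_iff_not]
    exact fun hh => ((pv_mod_two_flip q).mp hh) h
  · simp only [h, decide_false, Bool.not_false, decide_eq_true_eq]
    exact (pv_mod_two_flip q).mpr h

theorem pv_filter_append_singleton (acc : List Char) (d : Char)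
    (hacc : ∀ x ∈ acc, x ≠ '\'') (hd : d ≠ '\'') :
    (acc ++ [d]).filter (fun c => ¬(c = '\'')) = acc ++ [d] := by
  rw [List.filter_eq_self]
  intro x hx
  rcases List.mem_append.mp hx with h | h
  · simpa using hacc x h
  · simp at h; simp [h, hd]

theorem pvStep_quote (q : Int) (acc : List Char) (hacc : ∀ x ∈ acc, x ≠ '\'') :
    pvStep (q, acc) '\'' = (q + 1, acc) := by
  unfold pvStep
  simp [pv_lowerChar_quote, pv_replace_quote]
  exact hacc

theorem pvStep_other (q : Int) (acc : List Char) (c : Char) (hc : c ≠ '\'')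
    (hacc : ∀ x ∈ acc, x ≠ '\'') :
    pvStep (q, acc) c =
      (q, acc ++ (if PySem.Int.mod q 2 = 0 then [PySem.Chars.lowerChar c] else [c])) := by
  unfold pvStep
  simp only [if_neg hc, pv_replace_quote]
  by_cases hq : PySem.Int.mod q 2 = 0
  · simp only [if_pos hq]
    rw [pv_filter_append_singleton acc _ hacc (pv_lowerChar_ne_quote c hc)]
  · simp only [if_neg hq]
    rw [pv_filter_append_singleton acc _ hacc hc]

theorem pv_foldA (cs : List Char) (q : Int) (acc : List Char)
    (hacc : ∀ x ∈ acc, x ≠ '\'') :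
    (cs.foldl pvStep (q, acc)).2 = acc ++ pvH (decide (PySem.Int.mod q 2 = 0)) cs := by
  induction cs generalizing q acc with
  | nil => simp [pvH]
  | cons c cs ih =>
    rw [List.foldl_cons]
    by_cases hc : c = '\''
    · subst hc
      rw [pvStep_quote q acc hacc, ih (q + 1) acc hacc, pv_decide_flip]
      cases hb : decide (PySem.Int.mod q 2 = 0) <;> simp [pvH]
    · rw [pvStep_other q acc c hc hacc]
      have hd : ∀ x ∈ (if PySem.Int.mod q 2 = 0 then [PySem.Chars.lowerChar c] else [c]),
          x ≠ '\'' := by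
        intro x hx
        by_cases hq : PySem.Int.mod q 2 = 0
        · rw [if_pos hq] at hx
          simp only [List.mem_singleton] at hx
          exact hx ▸ pv_lowerChar_ne_quote c hc
        · rw [if_neg hq] at hx
          simp only [List.mem_singleton] at hx
          exact hx ▸ hc
      rw [ih q _ (by
        intro x hx
        rcases List.mem_append.mp hx with h | h
        · exact hacc x h
        · exact hd x h)]
      by_cases hq : PySem.Int.mod q 2 = 0 <;> simp [pvH, hc]

theorem pvE_pieces_eq_pvH (cs : List Char) (b : Bool) :
    pvE b (pvPieces cs) = pvH b cs := by
  induction cs generalizing b with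
  | nil =>
    simp only [pvPieces, pvE, pvH, PySem.Chars.lower, List.map_nil]
    split <;> rfl
  | cons c cs ih =>
    by_cases hc : c = '\''
    · subst hc
      have hp : pvPieces ('\'' :: cs) = [] :: pvPieces cs := by simp [pvPieces]
      have hh : pvH b ('\'' :: cs) = pvH (!b) cs := by simp [pvH]
      rw [hp, hh]
      simp only [pvE]
      have h0 : (if b then PySem.Chars.lower [] else []) = [] := by
        cases b <;> simp [PySem.Chars.lower]
      rw [h0, List.nil_append, ih (!b)]
    · have hp : pvPieces (c :: cs) = (c :: (pvPieces cs).headI) :: (pvPieces cs).tail := by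
        simp [pvPieces, hc]
      have hh : pvH b (c :: cs) =
          (if b then [PySem.Chars.lowerChar c] else [c]) ++ pvH b cs := by
        simp [pvH, hc]
      have ih' := ih b
      rw [pvPieces_cons_headI_tail cs] at ih'
      simp only [pvE] at ih'
      rw [hp, hh]
      simp only [pvE]
      cases b with
      | false =>
        simp only [Bool.false_eq_true, if_false] at ih' ⊢
        rw [List.cons_append, ih']
        rfl
      | true =>
        simp [PySem.Chars.lower] at ih' ⊢
        rw [← ih']

theorem pv_join_enumerate (ps : List (List Char)) (n : Int) :
    PySem.Chars.join []
      ((PySem.List.enumerate ps n).map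
        (fun p => if PySem.Int.mod p.1 2 = 0 then PySem.Chars.lower p.2 else p.2)) =
      pvE (decide (PySem.Int.mod n 2 = 0)) ps := by
  induction ps generalizing n with
  | nil => simp [PySem.List.enumerate, pvE, PySem.Chars.join, List.intercalate]
  | cons p ps ih =>
    rw [PySem.List.enumerate_cons, List.map_cons, pv_join_nil, List.flatten_cons,
      ← pv_join_nil, ih (n + 1), pv_decide_flip]
    by_cases h : PySem.Int.mod n 2 = 0 <;> simp [pvE]

-- ===== VERDICT (by name: the statement is the Claim_ definition above) =====
theorem lower_and_consider_quotes_spec : Claim_equal_lower_and_consider_quotes := by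
  intro s _ _
  show String.ofList (s.toList.foldl pvStep ((0 : Int), ([] : List Char))).2 =
    lower_and_consider_quotes_alt s
  rw [pv_foldA s.toList 0 [] (by simp), List.nil_append]
  rw [show lower_and_consider_quotes_alt s =
      String.ofList (PySem.Chars.join []
        ((PySem.List.enumerate (PySem.Chars.splitOn s.toList ['\''])).map
          (fun p => if PySem.Int.mod p.1 2 = 0 then PySem.Chars.lower p.2 else p.2))) from rfl]
  rw [pv_splitOn_eq, pv_join_enumerate, pvE_pieces_eq_pvH]
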